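-- pv_equiv track=rewrite | github.com/Vladimir-Moskov/PythonInterview | HackerRank/DataStructures_Trees.py | no_prefix_set
-- ===== SOURCE A (Python) =====
-- class ChNode:
--     def __init__(self, data, parent, is_end=False):
--         self.data = data
--         self.child = {}
--         self.is_end = is_end
--
-- def no_prefix_set(data_list):
--     word_dic = ChNode(None, None)
--
--     for current_str in data_list:
--         current_node = word_dic
--         for i in range(0, len(current_str)):
--             ch_val = current_str[i]
--             if ch_val in current_node.child:
--                 child_node = current_node.child[ch_val]
--                 if child_node.is_end:
--                     return ["BAD SET", current_str]
--                 if i == len(current_str) - 1: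
--                     return ["BAD SET", current_str]
--                     # for temp_str in data_list:
--                     #     if temp_str.startswith(current_str):
--                     #         return ["BAD SET", temp_str]
--             else:
--                 child_node = ChNode(current_str[i], current_node, i == len(current_str) - 1)
--                 current_node.child[current_str[i]] = child_node
--             current_node = child_node
--
--     return ["GOOD SET"]
-- ===== SOURCE B (Python) =====
-- def no_prefix_set(data_list):
--     seen_words = set()
--     prefix_set = set()
--     for s in data_list:
--         if s in prefix_set or any(s[:j] in seen_words for j in range(1, len(s) + 1)):
--             return ["BAD SET", s]
--         seen_words.add(s)
--         for j in range(1, len(s)):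
--             prefix_set.add(s[:j])
--     return ["GOOD SET"]
-- ===== Notes on version B (the rewrite author's own statement) =====
-- stated objective: simpler
-- what changed: Replaces A's hand-built character trie (node class, child dicts, per-character descent with mutation) by two hash sets maintained in one pass: the exact words inserted so far and all their proper prefixes; a conflict is then two set-membership tests over the new string's prefixes.
import Mathlib
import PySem

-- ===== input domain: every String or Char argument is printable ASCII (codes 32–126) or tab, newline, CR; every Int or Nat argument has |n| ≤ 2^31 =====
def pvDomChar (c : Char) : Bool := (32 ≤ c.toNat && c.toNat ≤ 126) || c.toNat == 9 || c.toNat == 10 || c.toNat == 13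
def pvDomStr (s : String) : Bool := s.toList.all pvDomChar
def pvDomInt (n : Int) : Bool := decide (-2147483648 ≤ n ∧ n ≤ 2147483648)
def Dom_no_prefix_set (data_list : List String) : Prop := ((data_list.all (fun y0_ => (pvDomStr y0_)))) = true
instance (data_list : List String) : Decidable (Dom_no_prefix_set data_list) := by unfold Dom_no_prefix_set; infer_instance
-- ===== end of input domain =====

-- B replaces A's hand-built trie with two hash sets (exact words, and all proper prefixes of words),
-- turning the conflict test into set membership of the string's prefixes: simpler, no tree structure.

-- ===== PORT A =====
-- A's ChNode trie: node = (is_end, children); children is an insertion-ordered Char→node dict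
-- (mutual pair instead of a nested inductive; keys are distinct by construction).
mutual
inductive PyTrie where
  | node (isEnd : Bool) (children : PyTrieChildren)
inductive PyTrieChildren where
  | nil
  | cons (key : Char) (val : PyTrie) (rest : PyTrieChildren)
end

def PyTrie.isEnd : PyTrie → Bool
  | .node e _ => e

-- 'ch_val in current_node.child' / 'current_node.child[ch_val]' (first match; keys distinct)
def getChild : PyTrieChildren → Char → Option PyTrie
  | .nil, _ => none
  | .cons k v r, c => if k = c then some v else getChild r c

-- 'current_node.child[ch] = node' : overwrite in place, else append (Python dict semantics)
def setChild : PyTrieChildren → Char → PyTrie → PyTrieChildren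
  | .nil, c, u => .cons c u .nil
  | .cons k v r, c, u => if k = c then .cons k u r else .cons k v (setChild r c u)

-- the inner 'for i in range(0, len(current_str))' walk, step for step; none = the two BAD returns
def insertStr : PyTrie → List Char → Option PyTrie
  | t, [] => some t
  | .node e ch, c :: rest =>
    match getChild ch c with
    | some child =>
      if child.isEnd then none
      else if rest.isEmpty then none
      else
        match insertStr child rest with
        | none => none
        | some child' => some (.node e (setChild ch c child'))
    | none =>
      let child := PyTrie.node rest.isEmpty .nil
      match insertStr child rest with
      | none => none
      | some child' => some (.node e (setChild ch c child'))

-- the outer 'for current_str in data_list' loop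
def noPrefixLoop : PyTrie → List String → List String
  | _, [] => ["GOOD SET"]
  | t, s :: rest =>
    match insertStr t s.toList with
    | none => ["BAD SET", s]
    | some t' => noPrefixLoop t' rest

def no_prefix_set (data_list : List String) : List String :=
  noPrefixLoop (.node false .nil) data_list

-- ===== PORT B =====
-- Source B's loop: seen_words = exact inserted words, prefix_set = their proper prefixes
def altLoop : PySem.Set String → PySem.Set String → List String → List String
  | _, _, [] => ["GOOD SET"]
  | seen, prefixSet, s :: rest =>
    if PySem.Set.contains prefixSet s
        || (PySem.List.pyRange 1 (PySem.Str.len s + 1) 1).any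
             (fun j => PySem.Set.contains seen (PySem.Str.slice s none (some j)))
    then ["BAD SET", s]
    else
      altLoop (PySem.Set.add seen s)
        ((PySem.List.pyRange 1 (PySem.Str.len s) 1).foldl
          (fun ps j => PySem.Set.add ps (PySem.Str.slice s none (some j))) prefixSet)
        rest

def no_prefix_set_alt (data_list : List String) : List String :=
  altLoop PySem.Set.empty PySem.Set.empty data_list

-- ===== PRECONDITION & SPEC =====
def Spec_no_prefix_set (data_list : List String) (out : List String) : Prop := out = no_prefix_set_alt data_list
instance (data_list : List String) (out : List String) : Decidable (Spec_no_prefix_set data_list out) := by unfold Spec_no_prefix_set; infer_instance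

-- ===== CLAIM (what is proved, stated in full; the proofs are below) =====
def Claim_equal_no_prefix_set : Prop := ∀ (data_list : List String), Dom_no_prefix_set data_list → Spec_no_prefix_set data_list (no_prefix_set data_list)

-- ===== LEMMAS AND PROOFS =====
-- membership predicates on the trie
def mem_end : PyTrie → List Char → Bool
  | .node e _, [] => e
  | .node _ ch, c :: p =>
    match getChild ch c with
    | none => false
    | some u => mem_end u p

def mem_path : PyTrie → List Char → Bool
  | _, [] => true
  | .node _ ch, c :: p =>
    match getChild ch c with
    | none => false
    | some u => mem_path u p

theorem getChild_setChild_self : ∀ (ch : PyTrieChildren) (c : Char) (u : PyTrie),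
    getChild (setChild ch c u) c = some u
  | .nil, c, u => by simp [setChild, getChild]
  | .cons k v r, c, u => by
    by_cases h : k = c <;> simp [setChild, getChild, h, getChild_setChild_self r c u]

theorem getChild_setChild_ne : ∀ (ch : PyTrieChildren) (c d : Char) (u : PyTrie), d ≠ c →
    getChild (setChild ch c u) d = getChild ch d
  | .nil, c, d, u, h => by
    have hcd : ¬ c = d := fun hh => h hh.symm
    simp [setChild, getChild, hcd]
  | .cons k v r, c, d, u, h => by
    by_cases hk : k = c
    · subst hk
      have hkd : ¬ k = d := fun hh => h hh.symm
      simp [setChild, getChild, hkd]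
    · by_cases hd : k = d
      · subst hd; simp [setChild, getChild, hk, getChild]
      · simp [setChild, getChild, hk, hd, getChild_setChild_ne r c d u h]

theorem exists_shift (n : Nat) (P : Nat → Prop) :
    (∃ j, 1 ≤ j ∧ j ≤ n + 1 ∧ P j) ↔ P 1 ∨ ∃ j, 1 ≤ j ∧ j ≤ n ∧ P (j + 1) := by
  constructor
  · rintro ⟨j, h1, h2, hp⟩
    rcases Nat.exists_eq_add_of_le h1 with ⟨k, rfl⟩
    cases k with
    | zero => exact Or.inl hp
    | succ m => exact Or.inr ⟨m + 1, by omega, by omega, by simpa [Nat.add_comm] using hp⟩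
  · rintro (hp | ⟨j, h1, h2, hp⟩)
    · exact ⟨1, le_refl _, by omega, hp⟩
    · exact ⟨j + 1, by omega, by omega, hp⟩

theorem mem_end_fresh (b : Bool) (p : List Char) (hp : p ≠ []) :
    mem_end (.node b .nil) p = false := by
  cases p with
  | nil => simp at hp
  | cons c q => simp [mem_end, getChild]

theorem mem_path_fresh (b : Bool) (p : List Char) (hp : p ≠ []) :
    mem_path (.node b .nil) p = false := by
  cases p with
  | nil => simp at hp
  | cons c q => simp [mem_path, getChild]

theorem insertStr_eq_none_iff (cs : List Char) : ∀ (t : PyTrie),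
    insertStr t cs = none ↔
      ((∃ j, 1 ≤ j ∧ j ≤ cs.length ∧ mem_end t (cs.take j) = true) ∨
       (cs ≠ [] ∧ mem_path t cs = true)) := by
  induction cs with
  | nil => intro t; simp [insertStr]
  | cons c rest ih =>
    rintro ⟨e, ch⟩
    rw [List.length_cons, exists_shift]
    cases hg : getChild ch c with
    | none =>
      simp only [insertStr, hg]
      have hfresh : insertStr (PyTrie.node rest.isEmpty .nil) rest ≠ none := by
        rw [Ne, ih]
        rintro (⟨j, hj1, hj2, hmem⟩ | ⟨hne, hmem⟩)
        · rw [mem_end_fresh] at hmem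
          · exact absurd hmem (by simp)
          · rw [Ne, List.take_eq_nil_iff]
            rintro (h | h) <;> [omega; (rw [h] at hj2; simp at hj2; omega)]
        · rw [mem_path_fresh _ _ hne] at hmem; exact absurd hmem (by simp)
      cases hins : insertStr (PyTrie.node rest.isEmpty .nil) rest with
      | none => exact absurd hins hfresh
      | some t' => simp [mem_end, mem_path, hg]
    | some child =>
      rcases child with ⟨ce, cch⟩
      simp only [insertStr, hg, PyTrie.isEnd]
      cases ce with
      | true =>
        simp only [if_true]
        constructor
        · intro _; exact Or.inl (Or.inl (by simp [mem_end, hg]))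
        · intro _; trivial
      | false =>
        simp only [Bool.false_eq_true, if_false]
        by_cases hrest : rest.isEmpty
        · have hr : rest = [] := by simpa using hrest
          subst hr
          simp only [if_true, List.isEmpty_nil]
          constructor
          · intro _; exact Or.inr ⟨by simp, by simp [mem_path, hg]⟩
          · intro _; trivial
        · have hne : rest ≠ [] := by simpa using hrest
          simp only [hrest, Bool.false_eq_true, if_false]
          cases hins : insertStr (PyTrie.node false cch) rest with
          | none =>
            rw [ih] at hins
            refine iff_of_true rfl ?_
            rcases hins with ⟨j, hj1, hj2, hm⟩ | ⟨-, hm⟩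
            · exact Or.inl (Or.inr ⟨j, hj1, hj2, by simp [mem_end, hg, hm]⟩)
            · exact Or.inr ⟨by simp, by simp [mem_path, hg, hm]⟩
          | some child' =>
            have hno : ¬ _ := (not_iff_not.mpr (ih (PyTrie.node false cch))).mp (by simp [hins])
            refine iff_of_false (by simp) ?_
            rintro ((hEnd | ⟨j, hj1, hj2, hm⟩) | ⟨-, hm⟩)
            · simp [mem_end, hg] at hEnd
            · exact hno (Or.inl ⟨j, hj1, hj2, by simpa [mem_end, hg] using hm⟩)
            · exact hno (Or.inr ⟨hne, by simpa [mem_path, hg] using hm⟩)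

theorem mem_end_insertStr (cs : List Char) : ∀ (t t' : PyTrie), insertStr t cs = some t' →
    ∀ p, mem_end t' p = true ↔ (mem_end t p = true ∨ (p = cs ∧ cs ≠ [])) := by
  induction cs with
  | nil =>
    rintro t t' h p
    simp only [insertStr, Option.some.injEq] at h
    subst h; simp
  | cons c rest ih =>
    rintro ⟨e, ch⟩ t' h p
    cases hg : getChild ch c with
    | some child =>
      rcases child with ⟨ce, cch⟩
      simp only [insertStr, hg, PyTrie.isEnd] at h
      cases ce with
      | true => simp at h
      | false =>
        simp only [Bool.false_eq_true, if_false] at h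
        by_cases hrest : rest.isEmpty
        · rw [if_pos hrest] at h; exact absurd h (by simp)
        · rw [if_neg hrest] at h
          have hne : rest ≠ [] := by simpa using hrest
          cases hins : insertStr (PyTrie.node false cch) rest with
          | none => rw [hins] at h; simp at h
          | some child' =>
            rw [hins] at h
            simp only [Option.some.injEq] at h
            subst h
            cases p with
            | nil => simp [mem_end]
            | cons d q =>
              by_cases hd : d = c
              · subst hd
                simp only [mem_end, getChild_setChild_self, hg]
                rw [ih _ child' hins q]
                simp [hne]
              · simp [mem_end, getChild_setChild_ne ch c d child' hd, hd]
    | none =>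
      simp only [insertStr, hg] at h
      cases hins : insertStr (PyTrie.node rest.isEmpty .nil) rest with
      | none => rw [hins] at h; simp at h
      | some child' =>
        rw [hins] at h
        simp only [Option.some.injEq] at h
        subst h
        cases p with
        | nil => simp [mem_end]
        | cons d q =>
          by_cases hd : d = c
          · subst hd
            simp only [mem_end, getChild_setChild_self, hg]
            rw [ih _ child' hins q]
            cases q with
            | nil =>
              have h1 : mem_end (PyTrie.node rest.isEmpty PyTrieChildren.nil) ([] : List Char) = rest.isEmpty := by
                simp [mem_end]
              simp only [h1, Bool.false_eq_true, false_or, List.isEmpty_iff]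
              constructor
              · rintro (h | ⟨h, hne⟩)
                · exact ⟨by rw [h], by simp⟩
                · exact absurd h.symm hne
              · rintro ⟨h, -⟩
                injection h with _ h2'
                exact Or.inl h2'.symm
            | cons d' q' =>
              have h1 : mem_end (PyTrie.node rest.isEmpty PyTrieChildren.nil) (d' :: q') = false := by
                simp [mem_end, getChild]
              simp only [h1, Bool.false_eq_true, false_or]
              constructor
              · rintro ⟨rfl, -⟩; exact ⟨rfl, by simp⟩
              · rintro ⟨hq, -⟩
                injection hq with _ h2'
                exact ⟨h2', by rw [← h2']; simp⟩
          · simp [mem_end, getChild_setChild_ne ch c d child' hd, hd]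

theorem mem_path_insertStr (cs : List Char) : ∀ (t t' : PyTrie), insertStr t cs = some t' →
    ∀ p, mem_path t' p = true ↔ (mem_path t p = true ∨ p <+: cs) := by
  induction cs with
  | nil =>
    rintro t t' h p
    simp only [insertStr, Option.some.injEq] at h
    subst h
    cases p with
    | nil => simp [mem_path]
    | cons d q => simp
  | cons c rest ih =>
    rintro ⟨e, ch⟩ t' h p
    cases hg : getChild ch c with
    | some child =>
      rcases child with ⟨ce, cch⟩
      simp only [insertStr, hg, PyTrie.isEnd] at h
      cases ce with
      | true => simp at h
      | false =>
        simp only [Bool.false_eq_true, if_false] at h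
        by_cases hrest : rest.isEmpty
        · rw [if_pos hrest] at h; exact absurd h (by simp)
        · rw [if_neg hrest] at h
          cases hins : insertStr (PyTrie.node false cch) rest with
          | none => rw [hins] at h; simp at h
          | some child' =>
            rw [hins] at h
            simp only [Option.some.injEq] at h
            subst h
            cases p with
            | nil => simp [mem_path]
            | cons d q =>
              by_cases hd : d = c
              · subst hd
                simp only [mem_path, getChild_setChild_self, hg, List.cons_prefix_cons,
                  true_and]
                exact ih _ child' hins q
              · simp [mem_path, getChild_setChild_ne ch c d child' hd, hd,
                  List.cons_prefix_cons]
    | none =>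
      simp only [insertStr, hg] at h
      cases hins : insertStr (PyTrie.node rest.isEmpty .nil) rest with
      | none => rw [hins] at h; simp at h
      | some child' =>
        rw [hins] at h
        simp only [Option.some.injEq] at h
        subst h
        cases p with
        | nil => simp [mem_path]
        | cons d q =>
          by_cases hd : d = c
          · subst hd
            simp only [mem_path, getChild_setChild_self, hg, List.cons_prefix_cons, true_and]
            rw [ih _ child' hins q]
            cases q with
            | nil => simp [mem_path]
            | cons d' q' =>
              have h1 : mem_path (PyTrie.node rest.isEmpty PyTrieChildren.nil) (d' :: q') = false := by
                simp [mem_path, getChild]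
              simp [h1]
          · simp [mem_path, getChild_setChild_ne ch c d child' hd, hd, List.cons_prefix_cons]

theorem str_slice_take (s : String) (j : Int) (hj : 0 ≤ j) :
    PySem.Str.slice s none (some j) = String.ofList (s.toList.take j.toNat) := by
  simp [PySem.Str.slice, PySem.List.slice_to _ hj]

theorem ofList_inj (l l' : List Char) : String.ofList l = String.ofList l' ↔ l = l' := by
  constructor
  · intro h; have := congrArg String.toList h; simpa using this
  · intro h; rw [h]

theorem mem_foldl_add {α β : Type} [BEq α] [LawfulBEq α] (l : List β) (f : β → α) :
    ∀ (s : PySem.Set α) (x : α),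
      (x ∈ l.foldl (fun ps j => PySem.Set.add ps (f j)) s) ↔ (x ∈ s ∨ ∃ j ∈ l, x = f j) := by
  induction l with
  | nil => intro s x; simp
  | cons b bs ih =>
    intro s x
    simp only [List.foldl_cons, ih, PySem.Set.mem_add, List.mem_cons]
    constructor
    · rintro ((h | h) | ⟨j, hj, rfl⟩)
      · exact Or.inl h
      · exact Or.inr ⟨b, Or.inl rfl, h⟩
      · exact Or.inr ⟨j, Or.inr hj, rfl⟩
    · rintro (h | ⟨j, (rfl | hj), rfl⟩)
      · exact Or.inl (Or.inl h)
      · exact Or.inl (Or.inr rfl)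
      · exact Or.inr ⟨j, hj, rfl⟩

-- bisimulation relation between A's trie and B's two sets
def TrieRel (t : PyTrie) (seen prefixSet : PySem.Set String) : Prop :=
  (∀ p : List Char, p ≠ [] → (mem_end t p = true ↔ String.ofList p ∈ seen)) ∧
  (∀ p : List Char, p ≠ [] → (mem_path t p = true ↔ (String.ofList p ∈ prefixSet ∨ String.ofList p ∈ seen))) ∧
  ("" ∉ prefixSet)

theorem cond_equiv (t : PyTrie) (seen prefixSet : PySem.Set String) (s : String)
    (hR : TrieRel t seen prefixSet) :
    insertStr t s.toList = none ↔
      (PySem.Set.contains prefixSet s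
        || (PySem.List.pyRange 1 (PySem.Str.len s + 1) 1).any
             (fun j => PySem.Set.contains seen (PySem.Str.slice s none (some j)))) = true := by
  obtain ⟨hE, hP, hEmp⟩ := hR
  rw [insertStr_eq_none_iff]
  have hofl : String.ofList s.toList = s := by simp
  constructor
  · rintro (⟨j, hj1, hj2, hm⟩ | ⟨hne, hm⟩)
    · have hne : s.toList.take j ≠ [] := by
        rw [Ne, List.take_eq_nil_iff]; rintro (h | h); · omega
        · rw [h] at hj2; simp at hj2; omega
      have hseen := (hE _ hne).mp hm
      refine Or.inr ?_ |> Bool.or_eq_true_iff.mpr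
      rw [List.any_eq_true]
      refine ⟨(j : Int), ?_, ?_⟩
      · rw [PySem.List.mem_pyRange_one, PySem.Str.len_eq]
        refine ⟨by exact_mod_cast hj1, by omega⟩
      · rw [str_slice_take s _ (by positivity)]
        simpa [PySem.Set.contains] using hseen
    · rcases (hP _ hne).mp hm with h | h
      · refine Bool.or_eq_true_iff.mpr (Or.inl ?_)
        simpa [PySem.Set.contains, hofl] using h
      · refine Bool.or_eq_true_iff.mpr (Or.inr ?_)
        rw [List.any_eq_true]
        refine ⟨(s.toList.length : Int), ?_, ?_⟩
        · rw [PySem.List.mem_pyRange_one, PySem.Str.len_eq]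
          have : s.toList.length ≥ 1 := by
            cases hl : s.toList with
            | nil => rw [hl] at hne; simp at hne
            | cons a l => simp
          refine ⟨by exact_mod_cast this, by omega⟩
        · rw [str_slice_take s _ (by positivity)]
          have htk : List.take ((s.toList.length : Int)).toNat s.toList = s.toList := by simp
          rw [htk, hofl]
          simpa [PySem.Set.contains] using h
  · intro hb
    rcases Bool.or_eq_true_iff.mp hb with h | h
    · have hmem : s ∈ prefixSet := by simpa [PySem.Set.contains] using h
      have hne : s.toList ≠ [] := by
        intro hnil
        have : s = "" := by
          have := congrArg String.ofList hnil; simpa using this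
        rw [this] at hmem; exact hEmp hmem
      exact Or.inr ⟨hne, (hP _ hne).mpr (by rw [hofl]; exact Or.inl hmem)⟩
    · rw [List.any_eq_true] at h
      obtain ⟨j, hjr, hc⟩ := h
      rw [PySem.List.mem_pyRange_one, PySem.Str.len_eq] at hjr
      rw [str_slice_take s _ (by omega)] at hc
      have hne : s.toList.take j.toNat ≠ [] := by
        rw [Ne, List.take_eq_nil_iff]; rintro (hh | hh); · omega
        · rw [hh] at hjr; simp at hjr; omega
      refine Or.inl ⟨j.toNat, by omega, by omega, (hE _ hne).mpr ?_⟩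
      simpa [PySem.Set.contains] using hc

theorem rel_step (t t' : PyTrie) (seen prefixSet : PySem.Set String) (s : String)
    (hR : TrieRel t seen prefixSet) (hins : insertStr t s.toList = some t') :
    TrieRel t' (PySem.Set.add seen s)
      ((PySem.List.pyRange 1 (PySem.Str.len s) 1).foldl
        (fun ps j => PySem.Set.add ps (PySem.Str.slice s none (some j))) prefixSet) := by
  obtain ⟨hE, hP, hEmp⟩ := hR
  have hofl : String.ofList s.toList = s := by simp
  have hpfx : ∀ x : String,
      (x ∈ (PySem.List.pyRange 1 (PySem.Str.len s) 1).foldl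
        (fun ps j => PySem.Set.add ps (PySem.Str.slice s none (some j))) prefixSet) ↔
      (x ∈ prefixSet ∨ ∃ j : Int, (1 ≤ j ∧ j < (s.toList.length : Int)) ∧
          x = String.ofList (s.toList.take j.toNat)) := by
    intro x
    rw [mem_foldl_add (f := fun j => PySem.Str.slice s none (some j))]
    constructor
    · rintro (h | ⟨j, hj, rfl⟩)
      · exact Or.inl h
      · rw [PySem.List.mem_pyRange_one, PySem.Str.len_eq] at hj
        exact Or.inr ⟨j, hj, by rw [str_slice_take s _ (by omega)]⟩
    · rintro (h | ⟨j, hj, rfl⟩)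
      · exact Or.inl h
      · refine Or.inr ⟨j, ?_, by rw [str_slice_take s _ (by omega)]⟩
        rw [PySem.List.mem_pyRange_one, PySem.Str.len_eq]
        exact hj
  refine ⟨?_, ?_, ?_⟩
  · intro p hp
    rw [mem_end_insertStr _ _ _ hins p, PySem.Set.mem_add, hE p hp]
    constructor
    · rintro (h | ⟨rfl, -⟩)
      · exact Or.inl h
      · exact Or.inr hofl
    · rintro (h | h)
      · exact Or.inl h
      · have hps : p = s.toList := by
          have := congrArg String.toList h; simpa using this
        exact Or.inr ⟨hps, fun hnil => hp (hps.trans hnil)⟩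
  · intro p hp
    rw [mem_path_insertStr _ _ _ hins p, hpfx, PySem.Set.mem_add, hP p hp]
    have hiff : (p <+: s.toList) ↔
        ((∃ j : Int, (1 ≤ j ∧ j < (s.toList.length : Int)) ∧
          String.ofList p = String.ofList (s.toList.take j.toNat)) ∨ String.ofList p = s) := by
      constructor
      · intro hpre
        have hlen : p.length ≤ s.toList.length := hpre.length_le
        have hpl : 1 ≤ p.length := by
          cases hl : p with
          | nil => exact absurd hl hp
          | cons a l => simp
        by_cases hfull : p.length = s.toList.length
        · right
          rw [← hofl, ofList_inj]
          exact List.prefix_iff_eq_take.mp hpre |>.trans (by rw [hfull, List.take_length])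
        · left
          refine ⟨(p.length : Int), ⟨by exact_mod_cast hpl, by exact_mod_cast Nat.lt_of_le_of_ne hlen hfull⟩, ?_⟩
          rw [ofList_inj]
          simpa using List.prefix_iff_eq_take.mp hpre
      · rintro (⟨j, hj, hq⟩ | hq)
        · rw [ofList_inj] at hq
          rw [hq]; exact List.take_prefix _ _
        · rw [← hofl, ofList_inj] at hq
          rw [hq]

    rw [hiff]
    exact or_or_or_comm
  · rw [hpfx]
    rintro (h | ⟨j, hj, hq⟩)
    · exact hEmp h
    · have hne : s.toList.take j.toNat ≠ [] := by
        rw [Ne, List.take_eq_nil_iff]; rintro (hh | hh); · omega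
        · rw [hh] at hj; simp at hj; omega
      refine hne ?_
      have h2 := congrArg String.toList hq
      simpa using h2.symm

theorem loop_eq : ∀ (l : List String) (t : PyTrie) (seen prefixSet : PySem.Set String),
    TrieRel t seen prefixSet → noPrefixLoop t l = altLoop seen prefixSet l
  | [], t, seen, prefixSet, _ => by simp [noPrefixLoop, altLoop]
  | s :: rest, t, seen, prefixSet, hR => by
    rw [noPrefixLoop, altLoop]
    cases hins : insertStr t s.toList with
    | none =>
      rw [if_pos ((cond_equiv t seen prefixSet s hR).mp hins)]
    | some t' =>
      rw [if_neg (fun hb => by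
        rw [(cond_equiv t seen prefixSet s hR).mpr hb] at hins; exact (by simp at hins))]
      exact loop_eq rest t' _ _ (rel_step t t' seen prefixSet s hR hins)

theorem rel_init : TrieRel (.node false .nil) PySem.Set.empty PySem.Set.empty := by
  refine ⟨?_, ?_, ?_⟩
  · intro p hp; rw [mem_end_fresh _ _ hp]; simp [PySem.Set.empty]
  · intro p hp; rw [mem_path_fresh _ _ hp]; simp [PySem.Set.empty]
  · simp [PySem.Set.empty]

-- ===== VERDICT (by name: the statement is the Claim_ definition above) =====
theorem no_prefix_set_spec : Claim_equal_no_prefix_set := by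
  intro data_list _
  unfold Spec_no_prefix_set no_prefix_set no_prefix_set_alt
  exact loop_eq data_list _ _ _ rel_init
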